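-- pv_equiv track=rewrite | github.com/Vanderson10/C-digos-Python-UFCG | uni7/musica/musica.py | sei_tocar_musica
-- ===== SOURCE A (Python) =====
-- def sei_tocar_musica(musica, acordes):
--     simNao = 0
--     soma = 0
--     for i in range(0,len(musica)):
--         for l in range(0,len(acordes)):
--             if musica[i] == acordes[l]:
--                 simNao = 1
--
--         if simNao==1:
--             soma = soma+1
--
--         simNao = 0
--
--     if soma==len(musica):
--         return True
--
--     return False
-- ===== SOURCE B (Python) =====
-- def sei_tocar_musica(musica, acordes):
--     return set(musica) <= set(acordes)
-- ===== Notes on version B (the rewrite author's own statement) =====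
-- stated objective: idiomatic
-- what changed: Replaces the index-based nested loop with flag and counter by a single set-subset test: build the distinct notes and the distinct chords once and return set(musica) <= set(acordes).
import Mathlib
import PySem

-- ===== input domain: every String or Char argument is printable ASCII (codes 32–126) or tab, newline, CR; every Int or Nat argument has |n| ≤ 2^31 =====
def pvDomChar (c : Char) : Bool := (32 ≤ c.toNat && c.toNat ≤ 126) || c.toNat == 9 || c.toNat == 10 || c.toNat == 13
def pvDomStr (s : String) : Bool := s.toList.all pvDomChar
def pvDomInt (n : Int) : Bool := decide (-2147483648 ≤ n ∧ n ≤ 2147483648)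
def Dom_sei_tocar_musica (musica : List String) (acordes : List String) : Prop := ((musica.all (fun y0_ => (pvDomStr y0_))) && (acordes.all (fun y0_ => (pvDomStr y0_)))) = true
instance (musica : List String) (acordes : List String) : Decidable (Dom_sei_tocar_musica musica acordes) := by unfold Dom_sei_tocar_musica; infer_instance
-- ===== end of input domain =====

-- B replaces A's index-based nested loop with flag and counter by a single set-subset test.

-- ===== PORT A =====
-- literal port of A: indexed outer loop over musica, indexed inner scan of acordes
-- setting a flag, then counting flagged notes and comparing the count to len(musica)
def sei_tocar_musica (musica : List String) (acordes : List String) : Bool :=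
  -- state (simNao, soma), both Python ints
  let st := (PySem.List.pyRange 0 (PySem.List.len musica)).foldl
    (fun (st : Int × Int) i =>
      let simNao := (PySem.List.pyRange 0 (PySem.List.len acordes)).foldl
        (fun simNao l =>
          if PySem.List.pyGetD musica i "" == PySem.List.pyGetD acordes l "" then (1 : Int)
          else simNao)
        st.1
      let soma := if simNao == 1 then st.2 + 1 else st.2
      ((0 : Int), soma))                      -- simNao = 0 at the end of the body
    ((0 : Int), (0 : Int))
  st.2 == PySem.List.len musica

-- ===== PORT B =====
def sei_tocar_musica_alt (musica : List String) (acordes : List String) : Bool :=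
  PySem.Set.issubset (PySem.Set.ofList musica) (PySem.Set.ofList acordes)

-- ===== PRECONDITION & SPEC =====
def Spec_sei_tocar_musica (musica : List String) (acordes : List String) (out : Bool) : Prop := out = sei_tocar_musica_alt musica acordes
instance (musica : List String) (acordes : List String) (out : Bool) : Decidable (Spec_sei_tocar_musica musica acordes out) := by unfold Spec_sei_tocar_musica; infer_instance

-- ===== CLAIM (what is proved, stated in full; the proofs are below) =====
def Claim_equal_sei_tocar_musica : Prop := ∀ (musica : List String) (acordes : List String), Dom_sei_tocar_musica musica acordes → Spec_sei_tocar_musica musica acordes (sei_tocar_musica musica acordes)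

-- ===== LEMMAS AND PROOFS =====

-- A's inner scan over acordes: the flag ends 1 iff the note occurs, else keeps its start value
theorem pv_inner_list (x : String) (ac : List String) (s0 : Int) :
    ac.foldl (fun s a => if x == a then (1 : Int) else s) s0
      = if x ∈ ac then 1 else s0 := by
  induction ac generalizing s0 with
  | nil => simp
  | cons a t ih =>
    simp only [List.foldl_cons, beq_iff_eq] at ih ⊢
    by_cases h : x = a
    · subst h; simp [ih]
    · rw [if_neg h, ih]
      simp [List.mem_cons, h]

theorem pv_inner_range (x : String) (ac : List String) (s0 : Int) :
    (PySem.List.pyRange 0 (PySem.List.len ac)).foldl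
      (fun s l => if x == PySem.List.pyGetD ac l "" then (1 : Int) else s) s0
      = if x ∈ ac then 1 else s0 := by
  have h := PySem.List.map_pyGetD_pyRange_zero ac ""
  calc (PySem.List.pyRange 0 (PySem.List.len ac)).foldl
        (fun s l => if x == PySem.List.pyGetD ac l "" then (1 : Int) else s) s0
      = ((PySem.List.pyRange 0 (PySem.List.len ac)).map
          (fun j => PySem.List.pyGetD ac j "")).foldl
          (fun s a => if x == a then (1 : Int) else s) s0 := by rw [List.foldl_map]
    _ = ac.foldl (fun s a => if x == a then (1 : Int) else s) s0 := by rw [h]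
    _ = if x ∈ ac then 1 else s0 := pv_inner_list x ac s0

-- A's outer loop: soma counts the notes of m found in ac
theorem pv_outer (ac m : List String) (soma0 : Int) :
    (m.foldl
      (fun (st : Int × Int) x =>
        ((0 : Int),
          if ((PySem.List.pyRange 0 (PySem.List.len ac)).foldl
                (fun s l => if x == PySem.List.pyGetD ac l "" then (1 : Int) else s)
                st.1) == 1
          then st.2 + 1 else st.2))
      ((0 : Int), soma0)).2
    = soma0 + (m.countP (fun x => decide (x ∈ ac)) : Int) := by
  induction m generalizing soma0 with
  | nil => simp
  | cons x t ih =>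
    simp only [List.foldl_cons]
    rw [pv_inner_range]
    by_cases h : x ∈ ac
    · rw [ih]
      simp [h]
      ring
    · rw [ih]
      simp [h]

-- ===== VERDICT (by name: the statement is the Claim_ definition above) =====
theorem sei_tocar_musica_spec : Claim_equal_sei_tocar_musica := by
  intro musica acordes _
  unfold Spec_sei_tocar_musica sei_tocar_musica sei_tocar_musica_alt
  have hmap := PySem.List.map_pyGetD_pyRange_zero musica ""
  have hfold :
      (PySem.List.pyRange 0 (PySem.List.len musica)).foldl
        (fun (st : Int × Int) i =>
          ((0 : Int),
            if ((PySem.List.pyRange 0 (PySem.List.len acordes)).foldl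
                  (fun s l => if PySem.List.pyGetD musica i "" == PySem.List.pyGetD acordes l "" then (1 : Int) else s)
                  st.1) == 1
            then st.2 + 1 else st.2))
        ((0 : Int), (0 : Int))
      = musica.foldl
        (fun (st : Int × Int) x =>
          ((0 : Int),
            if ((PySem.List.pyRange 0 (PySem.List.len acordes)).foldl
                  (fun s l => if x == PySem.List.pyGetD acordes l "" then (1 : Int) else s)
                  st.1) == 1
            then st.2 + 1 else st.2))
        ((0 : Int), (0 : Int)) := by
    calc _ = ((PySem.List.pyRange 0 (PySem.List.len musica)).map
              (fun j => PySem.List.pyGetD musica j "")).foldl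
              (fun (st : Int × Int) x =>
                ((0 : Int),
                  if ((PySem.List.pyRange 0 (PySem.List.len acordes)).foldl
                        (fun s l => if x == PySem.List.pyGetD acordes l "" then (1 : Int) else s)
                        st.1) == 1
                  then st.2 + 1 else st.2))
              ((0 : Int), (0 : Int)) := by rw [List.foldl_map]
      _ = _ := by rw [hmap]
  simp only [hfold, pv_outer, zero_add]
  rw [Bool.eq_iff_iff]
  simp [PySem.Set.issubset, PySem.Set.mem_ofList, PySem.List.len,
        List.all_eq_true, List.countP_eq_length]
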